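-- pv_equiv track=rewrite | github.com/Datenflix007/Histy | histy-server/app/render/renderer.py | _format_contributors
-- ===== SOURCE A (Python) =====
-- from typing import Any, Iterable
--
-- def _split_name(name: str) -> tuple[str, str]:
--     if "," in name:
--         surname, given = name.split(",", 1)
--         return surname.strip(), given.strip()
--     parts = name.strip().split()
--     if len(parts) <= 1:
--         return name.strip(), ""
--     return parts[-1], " ".join(parts[:-1])
--
-- def _format_contributors(contributors: list[dict[str, Any]]) -> dict[str, str]:
--     authors = [c for c in contributors if c.get("role") == "author"]
--     editors = [c for c in contributors if c.get("role") == "editor"]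
--     primary = authors or editors or contributors
--
--     names = []
--     for contributor in primary:
--         name = contributor.get("name") or ""
--         names.append(name)
--
--     full = "; ".join(names)
--     first_name = names[0] if names else ""
--     surname, given = _split_name(first_name) if first_name else ("", "")
--     return {
--         "full": full,
--         "first_name": first_name,
--         "surname": surname,
--         "given": given,
--     }
-- ===== SOURCE B (Python) =====
-- def _split_name(name: str) -> tuple[str, str]:
--     if "," in name:
--         surname, given = name.split(",", 1)
--         return surname.strip(), given.strip()
--     parts = name.strip().split()
--     if len(parts) <= 1:
--         return name.strip(), ""
--     return parts[-1], " ".join(parts[:-1])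
--
-- _ROLE_PRIORITY = {"author": 0, "editor": 1}
--
-- def _format_contributors(contributors):
--     # Rank-based selection: instead of filtering per role and falling back with
--     # `or`, give every contributor a numeric priority (author=0 < editor=1 <
--     # anything else=2) and keep exactly the contributors of minimal priority.
--     # min=0 selects the authors; else min=1 selects the editors; else every
--     # contributor has priority 2, so all are kept -- same group as A's fallback.
--     pris = [_ROLE_PRIORITY.get(c.get("role"), 2) for c in contributors]
--     best = min(pris, default=2)
--     names = [(c.get("name") or "") for c, p in zip(contributors, pris) if p == best]
--     full = "; ".join(names)
--     first_name = names[0] if names else ""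
--     surname, given = _split_name(first_name) if first_name else ("", "")
--     return {
--         "full": full,
--         "first_name": first_name,
--         "surname": surname,
--         "given": given,
--     }
-- ===== Notes on version B (the rewrite author's own statement) =====
-- stated objective: alternative
-- what changed: Replaces A's per-role filtering with an or-chain fallback by rank-based selection: each contributor gets a numeric role priority (author=0, editor=1, other=2), the minimum priority is computed, and exactly the contributors attaining it form the primary group.
import Mathlib
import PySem

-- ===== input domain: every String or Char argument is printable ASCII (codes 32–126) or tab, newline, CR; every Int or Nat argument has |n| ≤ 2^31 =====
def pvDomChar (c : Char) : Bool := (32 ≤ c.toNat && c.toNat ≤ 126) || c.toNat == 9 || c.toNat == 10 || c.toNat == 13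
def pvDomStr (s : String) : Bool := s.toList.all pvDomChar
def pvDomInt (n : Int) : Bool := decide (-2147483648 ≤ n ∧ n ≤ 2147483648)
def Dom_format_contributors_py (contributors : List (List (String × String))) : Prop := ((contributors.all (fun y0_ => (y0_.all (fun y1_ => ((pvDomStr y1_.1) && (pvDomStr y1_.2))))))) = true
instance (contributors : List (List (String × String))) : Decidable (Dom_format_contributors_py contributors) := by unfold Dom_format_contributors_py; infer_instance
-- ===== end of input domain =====

-- B replaces A's per-role filtering with or-chain fallback by rank-based selection:
-- each contributor gets a role priority (author=0, editor=1, other=2) and exactly the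
-- contributors of minimal priority form the primary group (objective: alternative).

-- shared helper: _split_name (identical in Source A and Source B)
def pvSplitName (name : String) : String × String :=
  if PySem.Str.isIn "," name then
    match PySem.Str.splitMax? name "," 1 with
    | some (surname :: given :: _) => (PySem.Str.strip surname, PySem.Str.strip given)
    | _ => ("", "")  -- unreachable: split(",",1) with "," present yields two parts
  else
    let parts := PySem.Str.split₀ (PySem.Str.strip name)
    if parts.length ≤ 1 then (PySem.Str.strip name, "")
    else ((PySem.List.pyGet? parts (-1)).getD "",
          PySem.Str.join " " (PySem.List.slice parts none (some (-1))))

-- c.get("name") or ""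
def pvNameOf (c : List (String × String)) : String :=
  ((PySem.Dict.mk c).get? "name").getD ""

-- ===== PORT A =====
def format_contributors_py (contributors : List (List (String × String))) : List (String × String) :=
  let authors := contributors.filter (fun c => (PySem.Dict.mk c).get? "role" == some "author")
  let editors := contributors.filter (fun c => (PySem.Dict.mk c).get? "role" == some "editor")
  let primary := if authors ≠ [] then authors else if editors ≠ [] then editors else contributors
  let names := primary.foldl (fun ns c => ns ++ [pvNameOf c]) []
  let full := PySem.Str.join "; " names
  let first_name := match names with | [] => "" | n :: _ => n
  let sg := if first_name ≠ "" then pvSplitName first_name else ("", "")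
  [("full", full), ("first_name", first_name), ("surname", sg.1), ("given", sg.2)]

-- ===== PORT B =====
-- _ROLE_PRIORITY.get(c.get("role"), 2): the literal two-entry dict lookup with default 2,
-- transcribed as the corresponding match on the role value (a missing role never matches)
def pvPriority (c : List (String × String)) : Nat :=
  match (PySem.Dict.mk c).get? "role" with
  | some "author" => 0
  | some "editor" => 1
  | _ => 2

def format_contributors_py_alt (contributors : List (List (String × String))) : List (String × String) :=
  let pris := contributors.map pvPriority
  let best := (PySem.List.min? pris (fun x => x)).getD 2   -- min(pris, default=2)
  let names := ((contributors.zip pris).filter (fun cp => cp.2 == best)).map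
      (fun cp => pvNameOf cp.1)
  let full := PySem.Str.join "; " names
  let first_name := match names with | [] => "" | n :: _ => n
  let sg := if first_name ≠ "" then pvSplitName first_name else ("", "")
  [("full", full), ("first_name", first_name), ("surname", sg.1), ("given", sg.2)]

-- ===== PRECONDITION & SPEC =====
def Spec_format_contributors_py (contributors : List (List (String × String))) (out : List (String × String)) : Prop := out = format_contributors_py_alt contributors
instance (contributors : List (List (String × String))) (out : List (String × String)) : Decidable (Spec_format_contributors_py contributors out) := by unfold Spec_format_contributors_py; infer_instance

-- ===== CLAIM =====
def Claim_equal_format_contributors_py : Prop := ∀ (contributors : List (List (String × String))), Dom_format_contributors_py contributors → Spec_format_contributors_py contributors (format_contributors_py contributors)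

-- ===== LEMMAS AND PROOFS =====

theorem pvPriority_le (c : List (String × String)) : pvPriority c ≤ 2 := by
  unfold pvPriority; split <;> simp

theorem pvPriority_eq_zero (c : List (String × String)) :
    (pvPriority c = 0) ↔ (((PySem.Dict.mk c).get? "role" == some "author") = true) := by
  unfold pvPriority; split <;> simp_all

theorem pvPriority_eq_one (c : List (String × String)) :
    (pvPriority c = 1) ↔ (((PySem.Dict.mk c).get? "role" == some "editor") = true) := by
  unfold pvPriority; split <;> simp_all

-- running-min characterisation over a list of values ≤ 2
theorem pv_min_char (t : List Nat) (a : Nat) (ha : a ≤ 2) (ht : ∀ p ∈ t, p ≤ 2) :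
    t.foldl min a = if a = 0 ∨ 0 ∈ t then 0 else if a = 1 ∨ 1 ∈ t then 1 else 2 := by
  induction t generalizing a with
  | nil => simp only [List.foldl_nil, List.not_mem_nil, or_false]; split_ifs <;> omega
  | cons p ps ih =>
    have hp : p ≤ 2 := ht p (by simp)
    have hps : ∀ q ∈ ps, q ≤ 2 := fun q hq => ht q (by simp [hq])
    rw [List.foldl_cons, ih (min a p) (by omega) hps]
    by_cases h0 : (0 : Nat) ∈ ps <;> by_cases h1 : (1 : Nat) ∈ ps <;>
      simp only [h0, h1, List.mem_cons, or_true, or_false] <;> split_ifs <;> omega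

theorem pv_mem_zero (l : List (List (String × String))) :
    ((0:Nat) ∈ l.map pvPriority) ↔
      l.filter (fun c => (PySem.Dict.mk c).get? "role" == some "author") ≠ [] := by
  rw [ne_eq, List.filter_eq_nil_iff]
  simp only [List.mem_map, not_forall]
  constructor
  · rintro ⟨c, hc, h0⟩
    exact ⟨c, by simp [hc, (pvPriority_eq_zero c).1 h0]⟩
  · rintro ⟨c, h⟩
    simp only [not_not] at h
    exact ⟨c, h.1, (pvPriority_eq_zero c).2 h.2⟩

theorem pv_mem_one (l : List (List (String × String))) :
    ((1:Nat) ∈ l.map pvPriority) ↔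
      l.filter (fun c => (PySem.Dict.mk c).get? "role" == some "editor") ≠ [] := by
  rw [ne_eq, List.filter_eq_nil_iff]
  simp only [List.mem_map, not_forall]
  constructor
  · rintro ⟨c, hc, h0⟩
    exact ⟨c, by simp [hc, (pvPriority_eq_one c).1 h0]⟩
  · rintro ⟨c, h⟩
    simp only [not_not] at h
    exact ⟨c, h.1, (pvPriority_eq_one c).2 h.2⟩

-- A's name-collection loop is a map
theorem pv_foldl_names (l : List (List (String × String))) (acc : List String) :
    l.foldl (fun ns c => ns ++ [pvNameOf c]) acc = acc ++ l.map pvNameOf := by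
  induction l generalizing acc with
  | nil => simp
  | cons x xs ih => simp [ih]

-- B's zip/filter/map selection collapses to a filter by priority
theorem pv_zip_filter (l : List (List (String × String))) (b : Nat) :
    ((l.zip (l.map pvPriority)).filter (fun cp => cp.2 == b)).map (fun cp => pvNameOf cp.1)
      = (l.filter (fun c => pvPriority c == b)).map pvNameOf := by
  induction l with
  | nil => rfl
  | cons x xs ih =>
    simp only [List.map_cons, List.zip_cons_cons, List.filter_cons]
    by_cases h : (pvPriority x == b) = true <;> simp [h, ih]

theorem pv_best_char (l : List (List (String × String))) :
    (PySem.List.min? (l.map pvPriority) (fun x => x)).getD 2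
      = if (0:Nat) ∈ l.map pvPriority then 0
        else if (1:Nat) ∈ l.map pvPriority then 1 else 2 := by
  cases l with
  | nil => simp [PySem.List.min?]
  | cons x xs =>
    rw [List.map_cons, PySem.List.min?_id_cons, Option.getD_some,
        pv_min_char _ _ (pvPriority_le x)
          (by intro p hp; rcases List.mem_map.1 hp with ⟨c, _, h⟩; exact h ▸ pvPriority_le c)]
    simp only [List.mem_cons]
    split_ifs <;> tauto

-- the common tail of both ports, as a function of the collected names
def pvRender (names : List String) : List (String × String) :=
  let full := PySem.Str.join "; " names
  let first_name := match names with | [] => "" | n :: _ => n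
  let sg := if first_name ≠ "" then pvSplitName first_name else ("", "")
  [("full", full), ("first_name", first_name), ("surname", sg.1), ("given", sg.2)]

-- the two ports collect the same name list
theorem pv_names_eq (l : List (List (String × String))) :
    (if l.filter (fun c => (PySem.Dict.mk c).get? "role" == some "author") ≠ [] then
        l.filter (fun c => (PySem.Dict.mk c).get? "role" == some "author")
      else if l.filter (fun c => (PySem.Dict.mk c).get? "role" == some "editor") ≠ [] then
        l.filter (fun c => (PySem.Dict.mk c).get? "role" == some "editor")
      else l).foldl (fun ns c => ns ++ [pvNameOf c]) []
    = ((l.zip (l.map pvPriority)).filter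
        (fun cp => cp.2 == (PySem.List.min? (l.map pvPriority) (fun x => x)).getD 2)).map
        (fun cp => pvNameOf cp.1) := by
  rw [pv_zip_filter, pv_best_char, pv_foldl_names, List.nil_append]
  by_cases ha : l.filter (fun c => (PySem.Dict.mk c).get? "role" == some "author") = []
  · by_cases he : l.filter (fun c => (PySem.Dict.mk c).get? "role" == some "editor") = []
    · have h0 : ¬ ((0:Nat) ∈ l.map pvPriority) := by rw [pv_mem_zero]; simpa using ha
      have h1 : ¬ ((1:Nat) ∈ l.map pvPriority) := by rw [pv_mem_one]; simpa using he
      have hall : l.filter (fun c => pvPriority c == 2) = l := by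
        apply List.filter_eq_self.2
        intro c hc
        have hle := pvPriority_le c
        have hz : pvPriority c ≠ 0 := fun h => h0 (List.mem_map.2 ⟨c, hc, h⟩)
        have ho : pvPriority c ≠ 1 := fun h => h1 (List.mem_map.2 ⟨c, hc, h⟩)
        simp only [beq_iff_eq]; omega
      simp [ha, he, h0, h1, hall]
    · have h0 : ¬ ((0:Nat) ∈ l.map pvPriority) := by rw [pv_mem_zero]; simpa using ha
      have h1 : ((1:Nat) ∈ l.map pvPriority) := (pv_mem_one l).2 he
      have heq : l.filter (fun c => pvPriority c == 1)
          = l.filter (fun c => (PySem.Dict.mk c).get? "role" == some "editor") :=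
        List.filter_congr (fun c _ => by
          rw [Bool.eq_iff_iff, beq_iff_eq]
          exact pvPriority_eq_one c)
      simp [ha, he, h0, h1, heq]
  · have h0 : ((0:Nat) ∈ l.map pvPriority) := (pv_mem_zero l).2 ha
    have heq : l.filter (fun c => pvPriority c == 0)
        = l.filter (fun c => (PySem.Dict.mk c).get? "role" == some "author") :=
      List.filter_congr (fun c _ => by
        rw [Bool.eq_iff_iff, beq_iff_eq]
        exact pvPriority_eq_zero c)
    simp [ha, h0, heq]

-- ===== VERDICT =====
theorem format_contributors_py_spec : Claim_equal_format_contributors_py := by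
  intro l _
  unfold Spec_format_contributors_py
  have hA : format_contributors_py l
      = pvRender ((if l.filter (fun c => (PySem.Dict.mk c).get? "role" == some "author") ≠ [] then
        l.filter (fun c => (PySem.Dict.mk c).get? "role" == some "author")
      else if l.filter (fun c => (PySem.Dict.mk c).get? "role" == some "editor") ≠ [] then
        l.filter (fun c => (PySem.Dict.mk c).get? "role" == some "editor")
      else l).foldl (fun ns c => ns ++ [pvNameOf c]) []) := rfl
  have hB : format_contributors_py_alt l
      = pvRender (((l.zip (l.map pvPriority)).filter
        (fun cp => cp.2 == (PySem.List.min? (l.map pvPriority) (fun x => x)).getD 2)).map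
        (fun cp => pvNameOf cp.1)) := rfl
  rw [hA, hB, pv_names_eq]
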